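-- pv_equiv track=rewrite | github.com/mckayje3/rms-importer | backend/services/spec_matcher.py | _get_base_section
-- ===== SOURCE A (Python) =====
-- from typing import Optional
--
-- def _get_base_section(section: str) -> Optional[str]:
--     """
--     Extract base section (first 8 chars like "03 30 00").
--
--     UFGS format: "03 30 00.00 06" -> "03 30 00"
--     Standard format: "03 30 00" -> "03 30 00"
--     """
--     normalized = " ".join(section.split())
--     if len(normalized) >= 8:
--         base = normalized[:8].strip()
--         # Validate it looks like a section number
--         parts = base.split()
--         if len(parts) == 3 and all(len(p) == 2 for p in parts):
--             return base.lower()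
--     return None
-- ===== SOURCE B (Python) =====
-- import re
-- from typing import Optional
--
-- _BASE_RE = re.compile(r"\S\S \S\S \S\S")
--
-- def _get_base_section(section: str) -> Optional[str]:
--     """Extract base section (first 8 chars like "03 30 00")."""
--     normalized = " ".join(section.split())
--     m = _BASE_RE.match(normalized)
--     return m.group(0).lower() if m else None
-- ===== Notes on version B (the rewrite author's own statement) =====
-- stated objective: idiomatic
-- what changed: A's slice/strip/split/length-count validation of the normalized string is replaced by a single anchored regex match r'\S\S \S\S \S\S' whose group(0) is lowered and returned.
import Mathlib
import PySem

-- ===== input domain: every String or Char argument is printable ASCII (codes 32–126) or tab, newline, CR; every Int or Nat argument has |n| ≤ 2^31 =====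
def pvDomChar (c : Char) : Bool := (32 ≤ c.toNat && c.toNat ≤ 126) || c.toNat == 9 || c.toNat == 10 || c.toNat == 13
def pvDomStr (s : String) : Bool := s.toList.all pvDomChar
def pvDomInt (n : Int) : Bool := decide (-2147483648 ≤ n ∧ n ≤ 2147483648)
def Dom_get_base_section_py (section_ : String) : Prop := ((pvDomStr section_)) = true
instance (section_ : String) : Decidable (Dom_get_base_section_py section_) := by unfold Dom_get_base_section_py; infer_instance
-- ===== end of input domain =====

-- B replaces A's slice/strip/split/count validation of the normalized string by a single anchored
-- regex match r'\S\S \S\S \S\S' (more idiomatic, one pass over 8 chars instead of re-splitting).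

-- ===== PORT A =====
def get_base_section_py (section_ : String) : Option String :=
  -- normalized = " ".join(section.split())
  let normalized : List Char := PySem.Chars.join [' '] (PySem.Chars.split₀ section_.toList)
  if 8 ≤ normalized.length then
    -- base = normalized[:8].strip()
    let base := PySem.Chars.strip (PySem.Chars.slice normalized none (some 8))
    -- parts = base.split()
    let parts := PySem.Chars.split₀ base
    if parts.length = 3 ∧ parts.all (fun p => p.length == 2) then
      some (String.ofList (PySem.Chars.lower base))
    else none
  else none

-- ===== PORT B =====
-- hand port of re.match(r"\S\S \S\S \S\S", n): exact for this concrete pattern — it matches iff the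
-- string has ≥ 8 chars, positions 0,1,3,4,6,7 are non-whitespace (\S) and positions 2,5 are ' ',
-- and group(0) is then the 8-char prefix.
def pyMatchBase (n : List Char) : Option (List Char) :=
  match n with
  | c0 :: c1 :: c2 :: c3 :: c4 :: c5 :: c6 :: c7 :: _ =>
    if !PySem.Chars.isspace c0 && !PySem.Chars.isspace c1 && c2 == ' '
       && !PySem.Chars.isspace c3 && !PySem.Chars.isspace c4 && c5 == ' '
       && !PySem.Chars.isspace c6 && !PySem.Chars.isspace c7 then
      some [c0, c1, c2, c3, c4, c5, c6, c7]
    else none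
  | _ => none

def get_base_section_py_alt (section_ : String) : Option String :=
  -- normalized = " ".join(section.split()); m = _BASE_RE.match(normalized)
  let normalized : List Char := PySem.Chars.join [' '] (PySem.Chars.split₀ section_.toList)
  match pyMatchBase normalized with
  | some m => some (String.ofList (PySem.Chars.lower m))
  | none => none

-- ===== PRECONDITION & SPEC =====
def Spec_get_base_section_py (section_ : String) (out : Option String) : Prop := out = get_base_section_py_alt section_
instance (section_ : String) (out : Option String) : Decidable (Spec_get_base_section_py section_ out) := by unfold Spec_get_base_section_py; infer_instance

-- ===== CLAIM (what is proved, stated in full; the proofs are below) =====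
def Claim_equal_get_base_section_py : Prop := ∀ (section_ : String), Dom_get_base_section_py section_ → Spec_get_base_section_py section_ (get_base_section_py section_)

-- ===== LEMMAS AND PROOFS =====

-- every token produced by str.split() contains no whitespace character
theorem split₀_go_no_space (s cur : List Char) (acc : List (List Char))
    (hcur : ∀ c ∈ cur, PySem.Chars.isspace c = false)
    (hacc : ∀ t ∈ acc, ∀ c ∈ t, PySem.Chars.isspace c = false) :
    ∀ t ∈ PySem.Chars.split₀.go s cur acc, ∀ c ∈ t, PySem.Chars.isspace c = false := by
  induction s generalizing cur acc with
  | nil =>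
    intro t ht c hc
    by_cases h : cur.isEmpty
    · exact hacc t (by simpa [PySem.Chars.split₀.go, h] using ht) c hc
    · simp only [PySem.Chars.split₀.go, h, if_false, List.reverse_cons, List.mem_append,
        List.mem_reverse, List.mem_singleton, Bool.false_eq_true] at ht
      rcases ht with ht | rfl
      · exact hacc t ht c hc
      · exact hcur c (by simpa using hc)
  | cons a s ih =>
    intro t ht
    by_cases ha : PySem.Chars.isspace a
    · by_cases h : cur.isEmpty
      · exact ih [] acc (by simp) hacc t (by simpa [PySem.Chars.split₀.go, ha, h] using ht)
      · have hacc' : ∀ t ∈ (cur.reverse :: acc), ∀ c ∈ t, PySem.Chars.isspace c = false := by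
          intro t ht c hc
          rcases List.mem_cons.mp ht with rfl | ht
          · exact hcur c (by simpa using hc)
          · exact hacc t ht c hc
        exact ih [] (cur.reverse :: acc) (by simp) hacc' t
          (by simpa [PySem.Chars.split₀.go, ha, h] using ht)
    · have hcur' : ∀ c ∈ (a :: cur), PySem.Chars.isspace c = false := by
        intro c hc
        rcases List.mem_cons.mp hc with rfl | hc
        · simpa using ha
        · exact hcur c hc
      exact ih (a :: cur) acc hcur' hacc t (by simpa [PySem.Chars.split₀.go, ha] using ht)

theorem mem_intersperse_chars (t sep : List Char) (l : List (List Char))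
    (h : t ∈ l.intersperse sep) : t ∈ l ∨ t = sep := by
  induction l with
  | nil => simp at h
  | cons x xs ih =>
    cases xs with
    | nil => simp at h; simp [h]
    | cons y ys =>
      simp only [List.intersperse, List.mem_cons] at h ⊢
      rcases h with h | h | h
      · tauto
      · tauto
      · rcases ih h with h2 | h2
        · simp only [List.mem_cons] at h2; tauto
        · tauto

-- any whitespace character of " ".join(section.split()) is the single space ' '
theorem normalized_space (s : List Char) :
    ∀ c ∈ PySem.Chars.join [' '] (PySem.Chars.split₀ s),
      PySem.Chars.isspace c = true → c = ' ' := by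
  intro c hc hsp
  rw [PySem.Chars.join, List.intercalate] at hc
  simp only [List.mem_flatten] at hc
  obtain ⟨t, ht, hct⟩ := hc
  rcases mem_intersperse_chars t [' '] (PySem.Chars.split₀ s) ht with h2 | h2
  · exact absurd hsp (by simp [split₀_go_no_space s [] [] (by simp) (by simp) t
      (by simpa [PySem.Chars.split₀] using h2) c hct])
  · subst h2; simpa using hct

-- the core equivalence, for any string whose whitespace characters are all ' '
set_option maxHeartbeats 2000000 in
theorem key (n : List Char) (inv : ∀ c ∈ n, PySem.Chars.isspace c = true → c = ' ') :
    (if 8 ≤ n.length then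
       let base := PySem.Chars.strip (PySem.Chars.slice n none (some 8))
       let parts := PySem.Chars.split₀ base
       if parts.length = 3 ∧ parts.all (fun p => p.length == 2) then
         some (String.ofList (PySem.Chars.lower base))
       else none
     else none)
    = (match pyMatchBase n with
       | some m => some (String.ofList (PySem.Chars.lower m))
       | none => none) := by
  match n with
  | [] => simp [pyMatchBase]
  | [c0] => simp [pyMatchBase]
  | [c0, c1] => simp [pyMatchBase]
  | [c0, c1, c2] => simp [pyMatchBase]
  | [c0, c1, c2, c3] => simp [pyMatchBase]
  | [c0, c1, c2, c3, c4] => simp [pyMatchBase]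
  | [c0, c1, c2, c3, c4, c5] => simp [pyMatchBase]
  | [c0, c1, c2, c3, c4, c5, c6] => simp [pyMatchBase]
  | c0 :: c1 :: c2 :: c3 :: c4 :: c5 :: c6 :: c7 :: rest =>
    have sp : PySem.Chars.isspace ' ' = true := by decide
    have hsl : PySem.Chars.slice (c0 :: c1 :: c2 :: c3 :: c4 :: c5 :: c6 :: c7 :: rest) none (some 8)
        = [c0, c1, c2, c3, c4, c5, c6, c7] := by
      rw [PySem.Chars.slice_eq_listSlice, PySem.List.slice_to _ (by norm_num)]
      simp [List.take_succ_cons]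
    have d2 : c2 = ' ' ∨ ((c2 == ' ') = false ∧ PySem.Chars.isspace c2 = false) := by
      by_cases hc : c2 = ' '
      · exact Or.inl hc
      · refine Or.inr ⟨by simpa using hc, ?_⟩
        by_cases h : PySem.Chars.isspace c2 = true
        · exact absurd (inv c2 (by simp) h) hc
        · simpa using h
    have d5 : c5 = ' ' ∨ ((c5 == ' ') = false ∧ PySem.Chars.isspace c5 = false) := by
      by_cases hc : c5 = ' '
      · exact Or.inl hc
      · refine Or.inr ⟨by simpa using hc, ?_⟩
        by_cases h : PySem.Chars.isspace c5 = true
        · exact absurd (inv c5 (by simp) h) hc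
        · simpa using h
    clear inv
    rw [hsl]
    rcases d2 with rfl | ⟨e2, h2⟩ <;> rcases d5 with rfl | ⟨e5, h5⟩ <;>
    by_cases h0 : PySem.Chars.isspace c0 <;>
    by_cases h1 : PySem.Chars.isspace c1 <;>
    by_cases h3 : PySem.Chars.isspace c3 <;>
    by_cases h4 : PySem.Chars.isspace c4 <;>
    by_cases h6 : PySem.Chars.isspace c6 <;>
    by_cases h7 : PySem.Chars.isspace c7 <;>
    simp_all [pyMatchBase, PySem.Chars.strip, PySem.Chars.lstrip, PySem.Chars.rstrip,
      PySem.Chars.split₀, PySem.Chars.split₀.go]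

-- ===== VERDICT (by name: the statement is the Claim_ definition above) =====
theorem get_base_section_py_spec : Claim_equal_get_base_section_py := by
  intro section_ _
  unfold Spec_get_base_section_py get_base_section_py get_base_section_py_alt
  exact key _ (normalized_space section_.toList)
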